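-- pv_equiv track=rewrite | github.com/MdAbedin/binarysearch | 0101 - 0200/0168 Longest Contiguously Strictly Increasing Sublist After Deletion.py | solve
-- ===== SOURCE A (Python) =====
-- def solve(nums):
--     if not nums:
--         return 0
--
--     l = [1]
--
--     for i in range(1,len(nums)):
--         if nums[i] > nums[i-1]:
--             l.append(l[-1]+1)
--         else:
--             l.append(1)
--
--     r = [1]
--
--     for i in range(len(nums)-2,-1,-1):
--         if nums[i] < nums[i+1]:
--             r.append(r[-1]+1)
--         else:
--             r.append(1)
--
--     r.reverse()
--     ans = max(max(r), max(l))
--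
--     for i in range(1,len(nums)-1):
--         if nums[i-1] < nums[i+1]:
--             ans = max(ans, l[i-1]+r[i+1])
--
--     return ans
-- ===== SOURCE B (Python) =====
-- def solve(nums):
--     # Single forward pass: noDel = increasing run ending here, oneDel = best
--     # length ending here after deleting exactly one earlier element.
--     if not nums:
--         return 0
--     p2 = None          # value two positions back
--     p = nums[0]        # previous value
--     prevNoDel = 0      # run length ending two positions back
--     noDel = 1
--     oneDel = 0
--     ans = 1
--     for x in nums[1:]:
--         newNoDel = noDel + 1 if x > p else 1
--         c1 = oneDel + 1 if (x > p and oneDel > 0) else 0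
--         c2 = prevNoDel + 1 if (p2 is not None and x > p2) else 0
--         newOneDel = c1 if c1 > c2 else c2
--         cur = newNoDel if newNoDel > newOneDel else newOneDel
--         if cur > ans:
--             ans = cur
--         p2, p, prevNoDel, noDel, oneDel = p, x, noDel, newNoDel, newOneDel
--     return ans
-- ===== Notes on version B (the rewrite author's own statement) =====
-- stated objective: faster
-- what changed: Replaces A's three passes over two precomputed run-length arrays l and r (plus a list reversal and two whole-list max scans) by a single forward pass keeping two scalar run lengths (no-deletion and one-deletion best ending at the current element) and a running answer, in O(1) extra space.
import Mathlib
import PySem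

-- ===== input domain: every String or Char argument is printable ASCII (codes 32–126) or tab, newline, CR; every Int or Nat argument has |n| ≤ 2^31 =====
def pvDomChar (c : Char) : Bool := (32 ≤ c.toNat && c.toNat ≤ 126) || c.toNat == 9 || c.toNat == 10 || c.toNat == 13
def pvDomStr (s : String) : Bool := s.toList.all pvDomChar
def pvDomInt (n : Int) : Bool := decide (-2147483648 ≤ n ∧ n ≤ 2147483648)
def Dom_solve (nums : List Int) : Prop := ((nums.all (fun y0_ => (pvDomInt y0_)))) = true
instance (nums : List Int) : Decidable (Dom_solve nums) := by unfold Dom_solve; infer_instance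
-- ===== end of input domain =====

-- B replaces A's three index-loops over two precomputed arrays (l, r) by a single
-- forward pass keeping two scalar run lengths (no-deletion / one-deletion); objective: faster (constant factor, O(1) extra space).

-- ===== PORT A =====
-- All list indices in this port are provably in range (the loops run over valid index
-- ranges of nonempty lists), so xs[i] is ported with PySem.List.pyGetD (exact there);
-- likewise max(list) is over nonempty lists, so (max? …).getD 0 is exact.
def solve (nums : List Int) : Int :=
  if nums = [] then 0
  else
    let l : List Int := (PySem.List.pyRange 1 (nums.length : Int) 1).foldl
      (fun l i =>
        if PySem.List.pyGetD nums i 0 > PySem.List.pyGetD nums (i - 1) 0 then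
          l ++ [PySem.List.pyGetD l (-1) 0 + 1]
        else l ++ [1]) [1]
    let r : List Int := (PySem.List.pyRange ((nums.length : Int) - 2) (-1) (-1)).foldl
      (fun r i =>
        if PySem.List.pyGetD nums i 0 < PySem.List.pyGetD nums (i + 1) 0 then
          r ++ [PySem.List.pyGetD r (-1) 0 + 1]
        else r ++ [1]) [1]
    let r2 : List Int := r.reverse
    let ans : Int := max ((PySem.List.max? r2 (fun y => y)).getD 0)
                         ((PySem.List.max? l (fun y => y)).getD 0)
    (PySem.List.pyRange 1 ((nums.length : Int) - 1) 1).foldl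
      (fun ans i =>
        if PySem.List.pyGetD nums (i - 1) 0 < PySem.List.pyGetD nums (i + 1) 0 then
          max ans (PySem.List.pyGetD l (i - 1) 0 + PySem.List.pyGetD r2 (i + 1) 0)
        else ans) ans

-- ===== PORT B =====
-- state: p2 = value two back (none before), p = previous value, pn = run length two back,
-- nd = run length ending at p, od = best one-deletion length ending at p, ans = running answer
def solveAltGo (p2 : Option Int) (p pn nd od ans : Int) : List Int → Int
  | [] => ans
  | x :: t =>
    let nd' := if x > p then nd + 1 else 1
    let c1 := if x > p ∧ od > 0 then od + 1 else 0
    let c2 := match p2 with | some q => if x > q then pn + 1 else 0 | none => 0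
    let od' := if c1 > c2 then c1 else c2
    let cur := if nd' > od' then nd' else od'
    solveAltGo (some p) x nd nd' od' (if cur > ans then cur else ans) t

def solve_alt : List Int → Int
  | [] => 0
  | a :: t => solveAltGo none a 0 1 0 1 t

-- ===== PRECONDITION & SPEC =====
def Spec_solve (nums : List Int) (out : Int) : Prop := out = solve_alt nums
instance (nums : List Int) (out : Int) : Decidable (Spec_solve nums out) := by unfold Spec_solve; infer_instance

-- ===== CLAIM (what is proved, stated in full; the proofs are below) =====
def Claim_equal_solve : Prop := ∀ (nums : List Int), Dom_solve nums → Spec_solve nums (solve nums)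

-- ===== LEMMAS AND PROOFS =====

-- forward run lengths: (Lr p c t) i = length of increasing run ending at t[i], given the
-- previous element p carries run length c
def Lr (p c : Int) : List Int → List Int
  | [] => []
  | x :: t => (if p < x then c + 1 else 1) :: Lr x (if p < x then c + 1 else 1) t

-- backward run lengths: (Rr xs) i = length of increasing run starting at xs[i]
def Rr : List Int → List Int
  | [] => []
  | [_] => [1]
  | x :: y :: t => (if x < y then (Rr (y :: t)).headD 0 + 1 else 1) :: Rr (y :: t)

def c2f : Option Int → Int → Int → Int
  | some q, x, pn => if q < x then pn + 1 else 0
  | none, _, _ => 0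

-- reduction helpers for the c2 component
theorem c2f_some (q x pn : Int) : c2f (some q) x pn = if q < x then pn + 1 else 0 := rfl
theorem c2f_none (x pn : Int) : c2f none x pn = 0 := rfl
theorem c2f_match (p2 : Option Int) (x pn : Int) :
    (match p2 with | some q => if q < x then pn + 1 else 0 | none => 0) = c2f p2 x pn := by
  cases p2 <;> rfl

-- B's per-step "cur" values (max of the two run lengths at each position)
def curL (p2 : Option Int) (p pn nd od : Int) : List Int → List Int
  | [] => []
  | x :: t =>
    let nd' := if p < x then nd + 1 else 1
    let c1 := if p < x ∧ 0 < od then od + 1 else 0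
    let c2 := c2f p2 x pn
    max nd' (max c1 c2) :: curL (some p) x nd nd' (max c1 c2) t

-- A's combine terms l[i-1] + r[i+1] for windows (a,b,c) with a < c; lpm = l-value of a
def combT (lpm : Int) : List Int → List Int
  | a :: b :: c :: rest =>
    (if a < c then [lpm + (Rr (c :: rest)).headD 0] else []) ++
      combT (if a < b then lpm + 1 else 1) (b :: c :: rest)
  | _ => []

-- unfolding equations (all rfl)
theorem Lr_nil (p c : Int) : Lr p c [] = [] := rfl
theorem Lr_cons (p c x : Int) (t : List Int) :
    Lr p c (x :: t) = (if p < x then c + 1 else 1) :: Lr x (if p < x then c + 1 else 1) t := rfl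
theorem Rr_nil : Rr [] = [] := rfl
theorem Rr_one (x : Int) : Rr [x] = [1] := rfl
theorem Rr_cons2 (x y : Int) (t : List Int) :
    Rr (x :: y :: t) = (if x < y then (Rr (y :: t)).headD 0 + 1 else 1) :: Rr (y :: t) := rfl
theorem curL_nil (p2 : Option Int) (p pn nd od : Int) : curL p2 p pn nd od [] = [] := rfl
theorem curL_cons (p2 : Option Int) (p pn nd od x : Int) (t : List Int) :
    curL p2 p pn nd od (x :: t) =
      max (if p < x then nd + 1 else 1)
          (max (if p < x ∧ 0 < od then od + 1 else 0) (c2f p2 x pn)) ::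
        curL (some p) x nd (if p < x then nd + 1 else 1)
          (max (if p < x ∧ 0 < od then od + 1 else 0) (c2f p2 x pn)) t := rfl
theorem solveAltGo_cons (p2 : Option Int) (p pn nd od ans x : Int) (t : List Int) :
    solveAltGo p2 p pn nd od ans (x :: t) =
      (let nd' := if x > p then nd + 1 else 1
       let c1 := if x > p ∧ od > 0 then od + 1 else 0
       let c2 := match p2 with | some q => if x > q then pn + 1 else 0 | none => 0
       let od' := if c1 > c2 then c1 else c2
       let cur := if nd' > od' then nd' else od'
       solveAltGo (some p) x nd nd' od' (if cur > ans then cur else ans) t) := rfl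
theorem combT_cons3 (lpm a b c : Int) (rest : List Int) :
    combT lpm (a :: b :: c :: rest) =
      (if a < c then [lpm + (Rr (c :: rest)).headD 0] else []) ++
        combT (if a < b then lpm + 1 else 1) (b :: c :: rest) := rfl
theorem combT_one (lpm a : Int) : combT lpm [a] = [] := rfl
theorem combT_two (lpm a b : Int) : combT lpm [a, b] = [] := rfl

-- ---- generic fold-max toolkit ----

theorem ifmax (a b : Int) : (if a > b then a else b) = max a b := by
  simp only [max_def]; split_ifs <;> omega

theorem fmax_le {l : List Int} {a c : Int} (h1 : a ≤ c) (h2 : ∀ y ∈ l, y ≤ c) :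
    l.foldl max a ≤ c := by
  induction l generalizing a with
  | nil => exact h1
  | cons x t ih =>
    simp only [List.foldl_cons]
    exact ih (by have := h2 x (by simp); omega) (fun y hy => h2 y (by simp [hy]))

theorem fmax_init_mono (l : List Int) {a b : Int} (h : a ≤ b) :
    l.foldl max a ≤ l.foldl max b := by
  induction l generalizing a b with
  | nil => exact h
  | cons x t ih => exact ih (by omega)

theorem fmax_mono2 {l1 l2 : List Int} {a b : Int} (h : a ≤ b)
    (h2 : List.Forall₂ (· ≤ ·) l1 l2) : l1.foldl max a ≤ l2.foldl max b := by
  induction h2 generalizing a b with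
  | nil => exact h
  | cons hxy _ ih =>
    simp only [List.foldl_cons]
    exact ih (by have : _ ≤ _ := hxy; omega)

-- ---- structural facts about Lr / Rr ----

theorem Lr_mono (t : List Int) : ∀ (p : Int) {c c' : Int}, c ≤ c' →
    List.Forall₂ (· ≤ ·) (Lr p c t) (Lr p c' t) := by
  induction t with
  | nil => intro p c c' _; rw [Lr_nil, Lr_nil]; exact List.Forall₂.nil
  | cons x t ih =>
    intro p c c' h
    rw [Lr_cons, Lr_cons]
    by_cases hx : p < x
    · simp only [if_pos hx]
      exact List.Forall₂.cons (by omega) (ih x (by omega))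
    · simp only [if_neg hx]
      exact List.Forall₂.cons (by omega) (ih x (by omega))

theorem Rr_cons_eq (x : Int) (t : List Int) :
    Rr (x :: t) = (Rr (x :: t)).headD 0 :: Rr t := by
  cases t <;> rfl

theorem Rr_pos : ∀ (xs : List Int), ∀ v ∈ Rr xs, 1 ≤ v := by
  intro xs
  induction xs with
  | nil => intro v hv; rw [Rr_nil] at hv; cases hv
  | cons x t ih =>
    cases t with
    | nil => intro v hv; rw [Rr_one] at hv; simp at hv; omega
    | cons y t' =>
      intro v hv
      rw [Rr_cons2] at hv
      rcases List.mem_cons.1 hv with h | h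
      · subst h
        have hh : (Rr (y :: t')).headD 0 ∈ Rr (y :: t') := by
          rw [Rr_cons_eq y t']; exact List.mem_cons_self
        have := ih _ hh
        split <;> omega
      · exact ih v h

theorem Rr_head_pos (x : Int) (t : List Int) : 1 ≤ (Rr (x :: t)).headD 0 := by
  apply Rr_pos (x :: t)
  rw [Rr_cons_eq x t]; exact List.mem_cons_self

theorem Rr_drop : ∀ (k : Nat) (xs : List Int), (Rr xs).drop k = Rr (xs.drop k) := by
  intro k
  induction k with
  | zero => simp
  | succ k ih =>
    intro xs
    match xs with
    | [] => rw [Rr_nil]; simp [Rr_nil]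
    | [x] => rw [Rr_one]; cases k <;> simp [Rr_nil]
    | x :: y :: t' => rw [Rr_cons2, List.drop_succ_cons, List.drop_succ_cons, ih]

-- run starting at x, entered with accumulated l-value c, reaches l-value c + len - 1
theorem RL : ∀ (t : List Int) (x c : Int),
    c + (Rr (x :: t)).headD 0 - 1 ≤ (Lr x c t).foldl max c := by
  intro t
  induction t with
  | nil => intro x c; rw [Rr_one, Lr_nil]; simp
  | cons y t' ih =>
    intro x c
    rw [Rr_cons2, Lr_cons, List.foldl_cons]
    simp only [List.headD_cons]
    by_cases hxy : x < y
    · simp only [if_pos hxy]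
      have h1 := ih y (c + 1)
      have h2 : (Lr y (c+1) t').foldl max (c+1) ≤ (Lr y (c+1) t').foldl max (max c (c+1)) :=
        fmax_init_mono _ (by omega)
      omega
    · simp only [if_neg hxy]
      have h2 : max c 1 ≤ (Lr y 1 t').foldl max (max c 1) := (PySem.List.le_foldl_max _ _).1
      omega

theorem maxR_le_maxL : ∀ (t : List Int) (x : Int),
    (Rr (x :: t)).foldl max 1 ≤ (Lr x 1 t).foldl max 1 := by
  intro t
  induction t with
  | nil => intro x; rw [Rr_one, Lr_nil]; simp
  | cons y t' ih =>
    intro x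
    rw [Rr_cons_eq x (y :: t'), List.foldl_cons]
    have hR : (Rr (x :: y :: t')).headD 0 ≤ (Lr x 1 (y :: t')).foldl max 1 := by
      have h := RL (y :: t') x 1; omega
    have h1 : (1 : Int) ≤ (Lr x 1 (y :: t')).foldl max 1 := (PySem.List.le_foldl_max _ _).1
    apply fmax_le (by omega)
    intro v hv
    have hv1 : v ≤ (Rr (y :: t')).foldl max 1 := (PySem.List.le_foldl_max _ _).2 v hv
    have hv2 := ih y
    have hv3 : (Lr y 1 t').foldl max 1 ≤ (Lr x 1 (y :: t')).foldl max 1 := by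
      rw [Lr_cons, List.foldl_cons]
      exact fmax_mono2 (by split <;> omega) (Lr_mono t' y (by split <;> omega))
    omega

-- ---- B-side structure ----

theorem solveAltGo_eq : ∀ (t : List Int) (p2 : Option Int) (p pn nd od ans : Int),
    solveAltGo p2 p pn nd od ans t = (curL p2 p pn nd od t).foldl max ans := by
  intro t
  induction t with
  | nil => intro p2 p pn nd od ans; rfl
  | cons x t ih =>
    intro p2 p pn nd od ans
    rw [solveAltGo_cons, curL_cons, List.foldl_cons]
    simp only [gt_iff_lt, ifmax, ih, c2f_match]
    rw [max_comm _ ans]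

-- B's nd-chain dominates the l-values pointwise
theorem Lr_le_curL : ∀ (t : List Int) (p2 : Option Int) (p pn nd od : Int),
    List.Forall₂ (· ≤ ·) (Lr p nd t) (curL p2 p pn nd od t) := by
  intro t
  induction t with
  | nil => intro _ _ _ _ _; rw [Lr_nil, curL_nil]; exact List.Forall₂.nil
  | cons x t ih =>
    intro p2 p pn nd od
    rw [Lr_cons, curL_cons]
    exact List.Forall₂.cons (le_max_left _ _) (ih _ _ _ _ _)

-- an od-value > 0 at the head keeps extending: the future curs reach od + runlen - 1
theorem chain : ∀ (rest : List Int) (c : Int) (p2 : Option Int) (pn nd od : Int), 0 < od →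
    od + (Rr (c :: rest)).headD 0 - 1 ≤ (curL p2 c pn nd od rest).foldl max od := by
  intro rest
  induction rest with
  | nil => intro c p2 pn nd od h; rw [Rr_one, curL_nil]; simp
  | cons y rest' ih =>
    intro c p2 pn nd od h
    rw [Rr_cons2, curL_cons, List.foldl_cons]
    simp only [List.headD_cons]
    by_cases hcy : c < y
    · simp only [if_pos hcy]
      have hc1 : (if c < y ∧ 0 < od then od + 1 else 0) = od + 1 := by simp [hcy, h]
      rw [hc1]
      set c2v := c2f p2 y pn with hc2
      have hod' : (0 : Int) < max (od + 1) c2v := by omega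
      have h1 := ih y (some c) nd (nd + 1) (max (od + 1) c2v) hod'
      have h2 := fmax_init_mono (curL (some c) y nd (nd + 1) (max (od + 1) c2v) rest')
        (show max (od + 1) c2v ≤ max od (max (nd + 1) (max (od + 1) c2v)) by omega)
      omega
    · simp only [if_neg hcy]
      exact le_trans (by omega) (PySem.List.le_foldl_max _ _).1

-- every combine term of A is reached by some cur of B
theorem combT_terms_le : ∀ (s : List Int) (p2 : Option Int) (p pn nd od ans : Int),
    1 ≤ nd → ∀ v ∈ combT nd (p :: s), v ≤ (curL p2 p pn nd od s).foldl max ans := by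
  intro s
  induction s with
  | nil => intro _ _ _ _ _ _ _ v hv; rw [combT_one] at hv; cases hv
  | cons x s' ih =>
    cases s' with
    | nil => intro _ _ _ _ _ _ _ v hv; rw [combT_two] at hv; cases hv
    | cons y rest =>
      intro p2 p pn nd od ans hnd v hv
      rw [combT_cons3] at hv
      rw [curL_cons, List.foldl_cons]
      rcases List.mem_append.1 hv with h | h
      · by_cases hpy : p < y
        · rw [if_pos hpy] at h
          simp only [List.mem_singleton] at h; subst h
          rw [curL_cons, List.foldl_cons, c2f_some, if_pos hpy]
          set nd' := if p < x then nd + 1 else 1 with hnd'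
          set od' := max (if p < x ∧ 0 < od then od + 1 else 0) (c2f p2 x pn) with hod'
          set nd'' := if x < y then nd' + 1 else 1 with hnd''
          set od'' := max (if x < y ∧ 0 < od' then od' + 1 else 0) (nd + 1) with hod''
          have hpos : (0 : Int) < od'' := by omega
          have h1 := chain rest y (some x) nd' nd'' od'' hpos
          have h2 := fmax_init_mono (curL (some x) y nd' nd'' od'' rest)
            (show od'' ≤ max (max ans (max nd' od')) (max nd'' od'') by omega)
          omega
        · rw [if_neg hpy] at h; cases h
      · exact ih (some p) x nd (if p < x then nd + 1 else 1)
          (max (if p < x ∧ 0 < od then od + 1 else 0) (c2f p2 x pn))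
          (max ans _) (by split <;> omega) v h

-- grand invariant: every cur of B is bounded by A's answer ingredients
theorem curL_le : ∀ (t : List Int) (p2 : Option Int) (p pn nd od K : Int),
    1 ≤ nd → nd ≤ K →
    (∀ v ∈ Lr p nd t, v ≤ K) →
    (0 < od → od + (Rr (p :: t)).headD 0 - 1 ≤ K) →
    (∀ v ∈ combT nd (p :: t), v ≤ K) →
    (∀ q x t', p2 = some q → t = x :: t' → q < x → pn + (Rr (x :: t')).headD 0 ≤ K) →
    ∀ v ∈ curL p2 p pn nd od t, v ≤ K := by
  intro t
  induction t with
  | nil =>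
    intro p2 p pn nd od K _ _ _ _ _ _ v hv
    rw [curL_nil] at hv; cases hv
  | cons x t' ih =>
    intro p2 p pn nd od K h1 h2 hL hod hC h4 v hv
    rw [curL_cons] at hv
    have hhx : 1 ≤ (Rr (x :: t')).headD 0 := Rr_head_pos x t'
    have hhead : (Rr (p :: x :: t')).headD 0 =
        if p < x then (Rr (x :: t')).headD 0 + 1 else 1 := by rw [Rr_cons2]; rfl
    have hndK : (if p < x then nd + 1 else 1) ≤ K := by
      have := hL _ (by rw [Lr_cons]; exact List.mem_cons_self)
      exact this
    have hnd1 : (1 : Int) ≤ (if p < x then nd + 1 else 1) := by split <;> omega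
    have hc1 : 0 < (if p < x ∧ 0 < od then od + 1 else 0) →
        (if p < x ∧ 0 < od then od + 1 else 0) + (Rr (x :: t')).headD 0 - 1 ≤ K := by
      split_ifs with hc
      · intro _
        have := hod hc.2
        rw [hhead, if_pos hc.1] at this
        omega
      · omega
    have hc2 : 0 < c2f p2 x pn → c2f p2 x pn + (Rr (x :: t')).headD 0 - 1 ≤ K := by
      cases p2 with
      | none => rw [c2f_none]; omega
      | some q =>
        rw [c2f_some]
        split_ifs with hq
        · intro _
          have := h4 q x t' rfl rfl hq
          omega
        · omega
    rcases List.mem_cons.1 hv with hveq | hvtail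
    · subst hveq; omega
    · refine ih (some p) x nd (if p < x then nd + 1 else 1)
        (max (if p < x ∧ 0 < od then od + 1 else 0) (c2f p2 x pn)) K
        hnd1 hndK ?_ ?_ ?_ ?_ v hvtail
      · intro w hw
        exact hL w (by rw [Lr_cons]; exact List.mem_cons_of_mem _ hw)
      · intro hpos; omega
      · intro w hw
        cases t' with
        | nil => rw [combT_one] at hw; cases hw
        | cons y t'' =>
          exact hC w (by rw [combT_cons3]; exact List.mem_append_right _ hw)
      · intro q x2 t2 hq ht hqx2
        cases hq
        subst ht
        refine hC _ (by rw [combT_cons3, if_pos hqx2]; exact List.mem_append_left _ (by simp))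

-- ---- indexing helpers ----

theorem pyGetD_at_len (xs ys : List Int) (y : Int) :
    PySem.List.pyGetD (xs ++ y :: ys) ((xs.length : Nat) : Int) 0 = y := by
  rw [PySem.List.pyGetD_natCast, List.getD_eq_getElem?_getD,
    List.getElem?_append_right (le_refl xs.length)]
  simp

theorem pyGetD_of_drop_cons {xs : List Int} {k : Nat} {y : Int} {ys : List Int}
    (h : xs.drop k = y :: ys) : PySem.List.pyGetD xs ((k : Nat) : Int) 0 = y := by
  have h0 : (xs.drop k)[0]? = some y := by rw [h]; rfl
  have h1 : xs[k + 0]? = some y := by rw [← List.getElem?_drop]; exact h0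
  rw [PySem.List.pyGetD_natCast, List.getD_eq_getElem?_getD]
  simp only [Nat.add_zero] at h1
  simp [h1]

-- ---- bridging A's loops to the structural recursions ----

-- first loop: building l
theorem lA_loop : ∀ (rest pre : List Int) (p c : Int) (acc nums : List Int),
    nums = pre ++ p :: rest →
    PySem.List.pyGetD acc (-1) 0 = c →
    acc.length = pre.length + 1 →
    (PySem.List.pyRange ((pre.length : Int) + 1) (nums.length : Int) 1).foldl
      (fun l i =>
        if PySem.List.pyGetD nums i 0 > PySem.List.pyGetD nums (i - 1) 0 then
          l ++ [PySem.List.pyGetD l (-1) 0 + 1]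
        else l ++ [1]) acc
    = acc ++ Lr p c rest := by
  intro rest
  induction rest with
  | nil =>
    intro pre p c acc nums hn _ _
    rw [PySem.List.pyRange_one_eq_nil (by subst hn; simp), List.foldl_nil, Lr_nil,
      List.append_nil]
  | cons x rs ih =>
    intro pre p c acc nums hn hc hlen
    subst hn
    rw [PySem.List.pyRange_one_cons (by simp), List.foldl_cons]
    have e1 : PySem.List.pyGetD (pre ++ p :: x :: rs) ((pre.length : Int) + 1) 0 = x := by
      have : ((pre.length : Int) + 1) = (((pre ++ [p]).length : Nat) : Int) := by simp
      rw [this, show pre ++ p :: x :: rs = (pre ++ [p]) ++ x :: rs by simp]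
      exact pyGetD_at_len _ _ _
    have e2 : PySem.List.pyGetD (pre ++ p :: x :: rs) ((pre.length : Int) + 1 - 1) 0 = p := by
      rw [show ((pre.length : Int) + 1 - 1) = ((pre.length : Nat) : Int) by omega]
      exact pyGetD_at_len _ _ _
    rw [e1, e2, hc]
    have hstep : (if x > p then acc ++ [c + 1] else acc ++ [1]) =
        acc ++ [if p < x then c + 1 else 1] := by
      simp only [gt_iff_lt]; split <;> rfl
    rw [hstep]
    have hih := ih (pre ++ [p]) x (if p < x then c + 1 else 1)
      (acc ++ [if p < x then c + 1 else 1]) (pre ++ p :: x :: rs)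
      (by simp) (PySem.List.pyGetD_neg_one_append_singleton _ _ _) (by simp [hlen])
    rw [show ((pre ++ [p]).length : Int) + 1 = (pre.length : Int) + 1 + 1 by simp] at hih
    rw [hih, Lr_cons, List.append_assoc, List.singleton_append]

-- second loop: building r (reversed), walked from the right end of nums
theorem rA_loop : ∀ (preR suf nums : List Int), suf ≠ [] →
    nums = preR.reverse ++ suf →
    (PySem.List.pyRange ((preR.length : Int) - 1) (-1) (-1)).foldl
      (fun r i =>
        if PySem.List.pyGetD nums i 0 < PySem.List.pyGetD nums (i + 1) 0 then
          r ++ [PySem.List.pyGetD r (-1) 0 + 1]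
        else r ++ [1]) ((Rr suf).reverse)
    = (Rr nums).reverse := by
  intro preR
  induction preR with
  | nil =>
    intro suf nums _ hn
    rw [PySem.List.pyRange_neg_one_eq_nil (by norm_num), List.foldl_nil]
    subst hn; rfl
  | cons q pr ih =>
    intro suf nums hs hn
    rcases suf with _ | ⟨s0, s'⟩
    · exact absurd rfl hs
    subst hn
    have hnums : (q :: pr).reverse ++ s0 :: s' = pr.reverse ++ q :: s0 :: s' := by simp
    rw [hnums]
    rw [show (((q :: pr).length : Int) - 1) = ((pr.length : Nat) : Int) by simp,
      PySem.List.pyRange_neg_one_cons (by omega), List.foldl_cons]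
    have e1 : PySem.List.pyGetD (pr.reverse ++ q :: s0 :: s') ((pr.length : Nat) : Int) 0 = q := by
      rw [show ((pr.length : Nat) : Int) = ((pr.reverse.length : Nat) : Int) by simp]
      exact pyGetD_at_len _ _ _
    have e2 : PySem.List.pyGetD (pr.reverse ++ q :: s0 :: s') (((pr.length : Nat) : Int) + 1) 0 = s0 := by
      rw [show (((pr.length : Nat) : Int) + 1) = (((pr.reverse ++ [q]).length : Nat) : Int) by simp,
        show pr.reverse ++ q :: s0 :: s' = (pr.reverse ++ [q]) ++ s0 :: s' by simp]
      exact pyGetD_at_len _ _ _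
    have e3 : PySem.List.pyGetD ((Rr (s0 :: s')).reverse) (-1) 0 = (Rr (s0 :: s')).headD 0 := by
      rw [Rr_cons_eq s0 s', List.reverse_cons]
      exact PySem.List.pyGetD_neg_one_append_singleton _ _ _
    rw [e1, e2, e3]
    have hstep : (if q < s0 then (Rr (s0 :: s')).reverse ++ [(Rr (s0 :: s')).headD 0 + 1]
          else (Rr (s0 :: s')).reverse ++ [1]) = (Rr (q :: s0 :: s')).reverse := by
      rw [Rr_cons2 q s0 s', List.reverse_cons]
      split <;> rfl
    rw [hstep]
    exact ih (q :: s0 :: s') (pr.reverse ++ q :: s0 :: s') (by simp) (by simp)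

-- third loop: the combine pass
theorem cA_loop : ∀ (st : List Int) (sa : Int) (pre : List Int) (lpm ans : Int) (nums lfull : List Int),
    nums = pre ++ sa :: st →
    lfull.drop pre.length = lpm :: Lr sa lpm st →
    (PySem.List.pyRange ((pre.length : Int) + 1) ((nums.length : Int) - 1) 1).foldl
      (fun ans i =>
        if PySem.List.pyGetD nums (i - 1) 0 < PySem.List.pyGetD nums (i + 1) 0 then
          max ans (PySem.List.pyGetD lfull (i - 1) 0 + PySem.List.pyGetD (Rr nums) (i + 1) 0)
        else ans) ans
    = (combT lpm (sa :: st)).foldl max ans := by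
  intro st
  induction st with
  | nil =>
    intro sa pre lpm ans nums lfull hn _
    rw [PySem.List.pyRange_one_eq_nil (by subst hn; simp), List.foldl_nil, combT_one,
      List.foldl_nil]
  | cons sb st2 ih =>
    rcases st2 with _ | ⟨sc, rest⟩
    · intro sa pre lpm ans nums lfull hn _
      rw [PySem.List.pyRange_one_eq_nil (by subst hn; simp <;> omega), List.foldl_nil, combT_two,
        List.foldl_nil]
    · intro sa pre lpm ans nums lfull hn hl
      subst hn
      rw [PySem.List.pyRange_one_cons (by simp <;> omega), List.foldl_cons]
      have e1 : PySem.List.pyGetD (pre ++ sa :: sb :: sc :: rest) ((pre.length : Int) + 1 - 1) 0 = sa := by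
        rw [show ((pre.length : Int) + 1 - 1) = ((pre.length : Nat) : Int) by omega]
        exact pyGetD_at_len _ _ _
      have e2 : PySem.List.pyGetD (pre ++ sa :: sb :: sc :: rest) ((pre.length : Int) + 1 + 1) 0 = sc := by
        rw [show ((pre.length : Int) + 1 + 1) = (((pre ++ [sa, sb]).length : Nat) : Int) by simp <;> omega,
          show pre ++ sa :: sb :: sc :: rest = (pre ++ [sa, sb]) ++ sc :: rest by simp]
        exact pyGetD_at_len _ _ _
      have e3 : PySem.List.pyGetD lfull ((pre.length : Int) + 1 - 1) 0 = lpm := by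
        rw [show ((pre.length : Int) + 1 - 1) = ((pre.length : Nat) : Int) by omega]
        exact pyGetD_of_drop_cons hl
      have e4 : PySem.List.pyGetD (Rr (pre ++ sa :: sb :: sc :: rest)) ((pre.length : Int) + 1 + 1) 0
          = (Rr (sc :: rest)).headD 0 := by
        have hdrop : (pre ++ sa :: sb :: sc :: rest).drop (pre.length + 2) = sc :: rest := by
          rw [show pre ++ sa :: sb :: sc :: rest = (pre ++ [sa, sb]) ++ sc :: rest by simp]
          exact List.drop_left' (by simp)
        have hd : (Rr (pre ++ sa :: sb :: sc :: rest)).drop (pre.length + 2)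
            = (Rr (sc :: rest)).headD 0 :: Rr rest := by
          rw [Rr_drop, hdrop]
          exact Rr_cons_eq sc rest
        rw [show ((pre.length : Int) + 1 + 1) = ((pre.length + 2 : Nat) : Int) by push_cast; omega]
        exact pyGetD_of_drop_cons hd
      rw [e1, e2, e3, e4, combT_cons3]
      have hstep : ∀ (l2 : List Int),
          ((if sa < sc then [lpm + (Rr (sc :: rest)).headD 0] else []) ++ l2).foldl max ans
          = l2.foldl max (if sa < sc then max ans (lpm + (Rr (sc :: rest)).headD 0) else ans) := by
        intro l2; split <;> simp
      rw [hstep]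
      have hih := ih sb (pre ++ [sa]) (if sa < sb then lpm + 1 else 1)
        (if sa < sc then max ans (lpm + (Rr (sc :: rest)).headD 0) else ans)
        (pre ++ sa :: sb :: sc :: rest) lfull (by simp)
        (by
          have h2 : lfull.drop (pre.length + 1) = (lfull.drop pre.length).drop 1 := by
            rw [List.drop_drop]
          rw [show (pre ++ [sa]).length = pre.length + 1 by simp, h2, hl]
          rw [Lr_cons]
          rfl)
      rw [show ((pre ++ [sa]).length : Int) + 1 = (pre.length : Int) + 1 + 1 by simp] at hih
      exact hih

-- Python max over nonempty lists
theorem max_getD_cons (x : Int) (t : List Int) :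
    (PySem.List.max? (x :: t) (fun y => y)).getD 0 = t.foldl max x := by
  rw [PySem.List.max?_id_cons]; rfl

-- the central combinatorial identity: A's answer shape equals B's answer shape
theorem central (a : Int) (t : List Int) :
    (combT 1 (a :: t)).foldl max
        (max ((Rr (a :: t)).foldl max 1) ((Lr a 1 t).foldl max 1))
      = (curL none a 0 1 0 t).foldl max 1 := by
  have hMLB : (Lr a 1 t).foldl max 1 ≤ (curL none a 0 1 0 t).foldl max 1 :=
    fmax_mono2 le_rfl (Lr_le_curL t none a 0 1 0)
  have hMRB : (Rr (a :: t)).foldl max 1 ≤ (curL none a 0 1 0 t).foldl max 1 :=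
    le_trans (maxR_le_maxL t a) hMLB
  have hCB : ∀ v ∈ combT 1 (a :: t), v ≤ (curL none a 0 1 0 t).foldl max 1 :=
    fun v hv => combT_terms_le t none a 0 1 0 1 le_rfl v hv
  have h1A : (1 : Int) ≤ (combT 1 (a :: t)).foldl max
      (max ((Rr (a :: t)).foldl max 1) ((Lr a 1 t).foldl max 1)) := by
    have h1 := (PySem.List.le_foldl_max (Lr a 1 t) 1).1
    have h2 := (PySem.List.le_foldl_max (combT 1 (a :: t))
      (max ((Rr (a :: t)).foldl max 1) ((Lr a 1 t).foldl max 1))).1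
    omega
  apply le_antisymm
  · exact fmax_le (by omega) hCB
  · apply fmax_le h1A
    apply curL_le t none a 0 1 0 _ le_rfl h1A
    · intro v hv
      have h1 : v ≤ (Lr a 1 t).foldl max 1 := (PySem.List.le_foldl_max _ _).2 v hv
      have h2 := (PySem.List.le_foldl_max (combT 1 (a :: t))
        (max ((Rr (a :: t)).foldl max 1) ((Lr a 1 t).foldl max 1))).1
      omega
    · intro h; omega
    · intro v hv
      exact (PySem.List.le_foldl_max _ _).2 v hv
    · intro q x t' hq
      exact absurd hq (by simp)

theorem maxr_eq (a : Int) (t : List Int) :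
    (PySem.List.max? (Rr (a :: t)) (fun y => y)).getD 0 = (Rr (a :: t)).foldl max 1 := by
  rw [Rr_cons_eq a t, max_getD_cons, List.foldl_cons]
  congr 1
  have := Rr_head_pos a t
  omega

theorem solve_eq_alt (nums : List Int) : solve nums = solve_alt nums := by
  cases nums with
  | nil => rfl
  | cons a t =>
    rw [show solve_alt (a :: t) = solveAltGo none a 0 1 0 1 t from rfl, solveAltGo_eq,
      ← central a t]
    rw [solve, if_neg (List.cons_ne_nil a t)]
    have hL : List.foldl
        (fun l i =>
          if PySem.List.pyGetD (a :: t) i 0 > PySem.List.pyGetD (a :: t) (i - 1) 0 then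
            l ++ [PySem.List.pyGetD l (-1) 0 + 1]
          else l ++ [1])
        [1] (PySem.List.pyRange 1 (((a :: t).length : Nat) : Int) 1) = 1 :: Lr a 1 t := by
      simpa using lA_loop t [] a 1 [1] (a :: t) (by simp)
        (by simpa using PySem.List.pyGetD_neg_one_append_singleton ([] : List Int) 1 0) (by simp)
    have hR : List.foldl
        (fun r i =>
          if PySem.List.pyGetD (a :: t) i 0 < PySem.List.pyGetD (a :: t) (i + 1) 0 then
            r ++ [PySem.List.pyGetD r (-1) 0 + 1]
          else r ++ [1])
        [1] (PySem.List.pyRange ((((a :: t).length : Nat) : Int) - 2) (-1) (-1))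
        = (Rr (a :: t)).reverse := by
      have hsplit : a :: t = ((a :: t).dropLast).reverse.reverse ++
          [(a :: t).getLast (List.cons_ne_nil a t)] := by
        rw [List.reverse_reverse, List.dropLast_append_getLast]
      have h := rA_loop ((a :: t).dropLast).reverse
        [(a :: t).getLast (List.cons_ne_nil a t)] (a :: t) (by simp) hsplit
      rw [show ((((a :: t).dropLast.reverse).length : Nat) : Int) - 1
          = (((a :: t).length : Nat) : Int) - 2 by simp <;> omega] at h
      simpa [Rr_one] using h
    simp only [hL, hR, List.reverse_reverse, max_getD_cons, maxr_eq]
    simpa using cA_loop t a [] 1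
      (max ((Rr (a :: t)).foldl max 1) ((Lr a 1 t).foldl max 1)) (a :: t)
      (1 :: Lr a 1 t) rfl (by simp)

theorem solve_spec : Claim_equal_solve := by
  intro nums _
  exact solve_eq_alt nums
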